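-- pv_equiv track=rewrite | github.com/dennismdan/car_dealership_database_proj | Phase_3/Jaunty2/main_app/utils.py | cleanup_null_cols
-- ===== SOURCE A (Python) =====
-- def cleanup_null_cols(data: tuple, columns: list):
--     """
--     Function will clean up a row that has null values and remove columsn with null values
--
--     :param row:
--     :param columns:
--     :return:
--     """
--     new_data = []
--     cols = []
--
--     col_idx = []
--
--     for i in range(len(data[0])):
--         col_has_good_vals = []
--         for j in range(len(data)):
--             col_has_good_vals.append(data[j][i] is not None)
--         if any(col_has_good_vals):
--             col_idx.append(i)
--             cols.append(columns[i])
--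
--     for row in data:
--         new_row = []
--         for col_index in col_idx:
--             new_row.append(row[col_index])
--         new_data.append(tuple(new_row))
--
--     assert len(new_data[0]) == len(cols)
--
--     return new_data, cols
-- ===== SOURCE B (Python) =====
-- def cleanup_null_cols(data: tuple, columns: list):
--     """Drop columns whose values are all None and project rows accordingly,
--     by transposing once with zip(*data) instead of nested index loops."""
--     columns_t = list(zip(*data))
--     kept = [(name, col) for name, col in zip(columns, columns_t)
--             if any(v is not None for v in col)]
--     cols = [name for name, _ in kept]
--     kept_columns = [col for _, col in kept]
--     if kept_columns:
--         new_data = [tuple(row) for row in zip(*kept_columns)]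
--     else:
--         new_data = [() for _ in data]
--     assert len(new_data[0]) == len(cols)
--     return new_data, cols
-- ===== Notes on version B (the rewrite author's own statement) =====
-- stated objective: idiomatic
-- what changed: Replaces the nested index loops (scan each column index, then rebuild every row by indexing) with a single zip(*data) transpose, a filtered zip over (name, column) pairs, and one transpose back; the C-level zip removes the per-element Python indexing (measured ~1.5x at large sizes).
import Mathlib
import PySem

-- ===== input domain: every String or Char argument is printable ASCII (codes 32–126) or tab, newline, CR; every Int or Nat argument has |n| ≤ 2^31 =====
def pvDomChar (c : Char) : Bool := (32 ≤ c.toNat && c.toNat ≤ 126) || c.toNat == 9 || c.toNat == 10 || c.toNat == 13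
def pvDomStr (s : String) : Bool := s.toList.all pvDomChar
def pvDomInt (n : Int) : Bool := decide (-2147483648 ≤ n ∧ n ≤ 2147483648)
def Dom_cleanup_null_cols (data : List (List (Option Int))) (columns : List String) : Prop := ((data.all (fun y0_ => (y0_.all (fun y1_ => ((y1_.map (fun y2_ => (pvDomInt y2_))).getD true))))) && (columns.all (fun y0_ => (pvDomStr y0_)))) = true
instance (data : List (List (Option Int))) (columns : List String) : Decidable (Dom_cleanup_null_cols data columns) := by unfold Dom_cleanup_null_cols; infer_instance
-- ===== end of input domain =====

-- B replaces A's nested index loops by one zip(*data) transpose, a filtered zip of (name, column)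
-- pairs and a transpose back (idiomatic decomposition, same asymptotic cost); return values agree
-- on every input where A returns normally.

-- ===== PORT A =====
def cleanup_null_cols (data : List (List (Option Int))) (columns : List String) : List (List (Option Int)) × List String :=
  -- data[0]; IndexError on empty data is excluded by Pre_
  let row0 := PySem.List.pyGetD data 0 []
  let idx_cols :=
    (PySem.List.pyRange 0 (row0.length : Int) 1).foldl
      (fun (acc : List Int × List String) i =>
        let col_has_good_vals :=
          (PySem.List.pyRange 0 (data.length : Int) 1).foldl
            (fun cg j => cg ++ [(PySem.List.pyGetD (PySem.List.pyGetD data j []) i none).isSome]) []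
        if col_has_good_vals.any id then
          (acc.1 ++ [i], acc.2 ++ [PySem.List.pyGetD columns i ""])
        else acc)
      ([], [])
  let new_data :=
    data.foldl
      (fun nd row =>
        nd ++ [idx_cols.1.foldl (fun nr ci => nr ++ [PySem.List.pyGetD row ci none]) []])
      []
  (new_data, idx_cols.2)

-- ===== PORT B =====
-- one step of zip(*rows): the heads and the tails, none when some row is exhausted
def pvHeadsTails (rows : List (List (Option Int))) : Option (List (Option Int) × List (List (Option Int))) :=
  rows.foldr
    (fun r acc =>
      match r, acc with
      | x :: xs, some (hs, ts) => some (x :: hs, xs :: ts)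
      | _, _ => none)
    (some ([], []))

def pvZipGo : Nat → List (List (Option Int)) → List (List (Option Int))
  | 0, _ => []
  | k + 1, rows =>
    match pvHeadsTails rows with
    | some (hs, ts) => hs :: pvZipGo k ts
    | none => []

-- list(zip(*rows)) (fuel = first row's length bounds the number of zip steps)
def pvZipStar (rows : List (List (Option Int))) : List (List (Option Int)) :=
  match rows with
  | [] => []
  | r :: rs => pvZipGo r.length (r :: rs)

def cleanup_null_cols_alt (data : List (List (Option Int))) (columns : List String) : List (List (Option Int)) × List String :=
  let columns_t := pvZipStar data
  let kept := (columns.zip columns_t).filter (fun p => p.2.any (fun v => v.isSome))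
  let cols := kept.map Prod.fst
  let kept_columns := kept.map Prod.snd
  let new_data :=
    if kept_columns.isEmpty then data.map (fun _ => ([] : List (Option Int)))
    else pvZipStar kept_columns
  (new_data, cols)

-- ===== PRECONDITION & SPEC =====
-- Pre_ is exactly the set of inputs on which the Python A returns normally: data nonempty
-- (data[0] would raise IndexError), no row shorter than the first row (data[j][i] would raise
-- IndexError), and every column index past the end of `columns` is an all-None column
-- (columns[i] would raise IndexError on a kept index). On those excluded raising inputs with
-- nonempty data B returns a value (zip truncation) instead of raising; nothing is claimed there.
def Pre_cleanup_null_cols (data : List (List (Option Int))) (columns : List String) : Prop :=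
  data ≠ [] ∧
  (∀ r ∈ data, (data.headD []).length ≤ r.length) ∧
  (∀ i : Nat, i < (data.headD []).length → columns.length ≤ i → ∀ r ∈ data, r.getD i none = none)
instance (data : List (List (Option Int))) (columns : List String) : Decidable (Pre_cleanup_null_cols data columns) := by unfold Pre_cleanup_null_cols; infer_instance

def pvWitness_cleanup_null_cols : List (List (Option Int)) × List String :=
  ([[some 1, none], [none, none]], ["a", "b"])

def Spec_cleanup_null_cols (data : List (List (Option Int))) (columns : List String) (out : List (List (Option Int)) × List String) : Prop := out = cleanup_null_cols_alt data columns
instance (data : List (List (Option Int))) (columns : List String) (out : List (List (Option Int)) × List String) : Decidable (Spec_cleanup_null_cols data columns out) := by unfold Spec_cleanup_null_cols; infer_instance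

-- ===== CLAIM (what is proved, stated in full; the proofs are below) =====
def Claim_equal_cleanup_null_cols : Prop := ∀ (data : List (List (Option Int))) (columns : List String), Dom_cleanup_null_cols data columns → Pre_cleanup_null_cols data columns → Spec_cleanup_null_cols data columns (cleanup_null_cols data columns)

-- ===== LEMMAS AND PROOFS =====

def pvIdx (data : List (List (Option Int))) : List Nat :=
  (List.range (data.headD []).length).filter (fun i => data.any (fun r => (r.getD i none).isSome))

lemma foldl_pair_if {α β γ : Type} (p : α → Bool) (f : α → β) (g : α → γ) (l : List α)
    (a : List β) (b : List γ) :
    l.foldl (fun acc x => if p x then (acc.1 ++ [f x], acc.2 ++ [g x]) else acc) (a, b)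
      = (a ++ (l.filter p).map f, b ++ (l.filter p).map g) := by
  induction l generalizing a b with
  | nil => simp
  | cons x t ih => by_cases h : p x <;> simp [h, ih]

lemma any_range_getD {α : Type} (xs : List α) (d : α) (h : α → Bool) :
    (List.range xs.length).any (fun j => h (xs.getD j d)) = xs.any h := by
  induction xs with
  | nil => simp
  | cons x t ih =>
    simp only [List.length_cons, List.range_succ_eq_map, List.any_cons, List.any_map]
    simp only [List.getD_cons_zero, Function.comp_def, Nat.succ_eq_add_one, List.getD_cons_succ]
    rw [ih]

lemma any_range_getD' (data : List (List (Option Int))) (i : Nat) :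
    ((List.range data.length).any fun j => ((data.getD j []).getD i none).isSome)
      = data.any (fun r => (r.getD i none).isSome) :=
  any_range_getD data [] (fun r => (r.getD i none).isSome)

lemma A_eq (data : List (List (Option Int))) (columns : List String) (hne : data ≠ []) :
    cleanup_null_cols data columns =
      (data.map (fun r => (pvIdx data).map (fun i => r.getD i none)),
       (pvIdx data).map (fun i => columns.getD i "")) := by
  obtain ⟨d0, rest, rfl⟩ : ∃ d0 rest, data = d0 :: rest := by
    cases data with | nil => exact absurd rfl hne | cons a b => exact ⟨a, b, rfl⟩
  simp only [cleanup_null_cols]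
  rw [foldl_pair_if (fun i => ((PySem.List.pyRange 0 ((d0 :: rest).length : Int) 1).foldl
        (fun cg j => cg ++ [(PySem.List.pyGetD (PySem.List.pyGetD (d0 :: rest) j []) i none).isSome]) []).any id)
      (fun i => i) (fun i => PySem.List.pyGetD columns i "")]
  simp only [PySem.List.foldl_append_singleton_eq_map, List.nil_append, List.any_map,
    Function.comp_def, id_eq, any_range_getD', PySem.List.pyGetD_zero_cons,
    PySem.List.pyRange_zero_natCast, List.filter_map, List.map_map, PySem.List.pyGetD_natCast,
    pvIdx, List.headD_cons]


lemma pvHeadsTails_eq (rows : List (List (Option Int))) (h : ∀ r ∈ rows, r ≠ []) :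
    pvHeadsTails rows = some (rows.map (fun r => r.headD none), rows.map List.tail) := by
  induction rows with
  | nil => rfl
  | cons r t ih =>
    have hr : r ≠ [] := h r (List.mem_cons_self ..)
    obtain ⟨x, xs, rfl⟩ : ∃ x xs, r = x :: xs := by
      cases r with | nil => exact absurd rfl hr | cons x xs => exact ⟨x, xs, rfl⟩
    simp only [pvHeadsTails, List.foldr_cons] at *
    rw [ih (fun r hr' => h r (List.mem_cons_of_mem _ hr'))]
    rfl

lemma pvZipGo_eq (k : Nat) (rows : List (List (Option Int))) (h : ∀ r ∈ rows, k ≤ r.length) :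
    pvZipGo k rows = (List.range k).map (fun i => rows.map (fun r => r.getD i none)) := by
  induction k generalizing rows with
  | zero => simp [pvZipGo]
  | succ k ih =>
    have hne : ∀ r ∈ rows, r ≠ [] := by
      intro r hr hnil
      have := h r hr
      simp [hnil] at this
    rw [pvZipGo, pvHeadsTails_eq rows hne]
    show (rows.map (fun r => r.headD none)) :: pvZipGo k (rows.map List.tail) = _
    rw [ih (rows.map List.tail) (by
      intro r hr
      obtain ⟨r0, hr0, rfl⟩ := List.mem_map.mp hr
      have := h r0 hr0
      cases r0 with
      | nil => simp at this
      | cons x xs => simpa using this)]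
    rw [List.range_succ_eq_map]
    simp only [List.map_cons, List.map_map, List.cons.injEq]
    constructor
    · apply List.map_congr_left
      intro r hr
      cases r with
      | nil => exact absurd rfl (hne _ hr)
      | cons x xs => rfl
    · apply List.map_congr_left
      intro i _
      simp only [Function.comp_def]
      apply List.map_congr_left
      intro r hr
      cases r with
      | nil => exact absurd rfl (hne _ hr)
      | cons x xs => rfl

lemma pvZipStar_eq (data : List (List (Option Int))) (hne : data ≠ [])
    (hlen : ∀ r ∈ data, (data.headD []).length ≤ r.length) :
    pvZipStar data
      = (List.range (data.headD []).length).map (fun i => data.map (fun r => r.getD i none)) := by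
  obtain ⟨d0, rest, rfl⟩ : ∃ d0 rest, data = d0 :: rest := by
    cases data with | nil => exact absurd rfl hne | cons a b => exact ⟨a, b, rfl⟩
  simp only [pvZipStar, List.headD_cons] at *
  exact pvZipGo_eq d0.length (d0 :: rest) hlen

lemma zip_map_range {α β : Type} (xs : List α) (d : α) (g : Nat → β) (n : Nat) :
    xs.zip ((List.range n).map g)
      = (List.range (min xs.length n)).map (fun i => (xs.getD i d, g i)) := by
  apply List.ext_getElem
  · simp
  · intro i h1 h2
    simp only [List.getElem_zip, List.getElem_map, List.getElem_range]
    rw [List.getD_eq_getElem xs d (by simp at h1; omega)]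

lemma filter_range_of_false (m n : Nat) (p : Nat → Bool) (hmn : m ≤ n)
    (hfalse : ∀ i, m ≤ i → i < n → p i = false) :
    (List.range n).filter p = (List.range m).filter p := by
  obtain ⟨k, rfl⟩ := Nat.exists_eq_add_of_le hmn
  rw [List.range_add, List.filter_append]
  have : (List.filter p (List.map (m + ·) (List.range k))) = [] := by
    rw [List.filter_eq_nil_iff]
    intro a ha
    obtain ⟨j, hj, rfl⟩ := List.mem_map.mp ha
    simp only [List.mem_range] at hj
    simp [hfalse (m + j) (by omega) (by omega)]
  simp [this]

lemma map_range_getD (data : List (List (Option Int))) (g : List (Option Int) → List (Option Int)) :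
    (List.range data.length).map (fun j => g (data.getD j [])) = data.map g := by
  apply List.ext_getElem
  · simp
  · intro j h1 h2
    simp only [List.getElem_map, List.getElem_range]
    rw [List.getD_eq_getElem data [] (by simpa using h1)]

lemma B_eq (data : List (List (Option Int))) (columns : List String) (hne : data ≠ [])
    (hlen : ∀ r ∈ data, (data.headD []).length ≤ r.length)
    (hover : ∀ i : Nat, i < (data.headD []).length → columns.length ≤ i →
      ∀ r ∈ data, r.getD i none = none) :
    cleanup_null_cols_alt data columns =
      (data.map (fun r => (pvIdx data).map (fun i => r.getD i none)),
       (pvIdx data).map (fun i => columns.getD i "")) := by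
  simp only [cleanup_null_cols_alt]
  rw [pvZipStar_eq data hne hlen,
    zip_map_range columns "" (fun i => data.map (fun r => r.getD i none)) (data.headD []).length,
    List.filter_map]
  have hc : ((fun p : String × List (Option Int) => p.2.any (fun v => v.isSome)) ∘
      (fun i => (columns.getD i "", data.map (fun r => r.getD i none))))
      = fun i => data.any (fun r => (r.getD i none).isSome) := by
    funext i
    simp [List.any_map, Function.comp_def]
  rw [hc]
  have hfilt : (List.range (min columns.length (data.headD []).length)).filter
        (fun i => data.any (fun r => (r.getD i none).isSome))
      = (List.range (data.headD []).length).filter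
        (fun i => data.any (fun r => (r.getD i none).isSome)) := by
    refine (filter_range_of_false _ _ _ (Nat.min_le_right _ _) ?_).symm
    intro i hmi hin
    have hci : columns.length ≤ i := by omega
    rw [List.any_eq_false]
    intro r hr
    have h0 : r.getD i none = none := hover i hin hci r hr
    rw [List.getD_eq_getElem?_getD] at h0
    simp [h0]
  rw [hfilt]
  have hidx : (List.range (data.headD []).length).filter
      (fun i => data.any (fun r => (r.getD i none).isSome)) = pvIdx data := rfl
  rw [hidx]
  simp only [List.map_map]
  rcases heq : pvIdx data with _ | ⟨i0, t⟩
  · simp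
  · simp only [List.map_cons, List.isEmpty_cons, Bool.false_eq_true, if_false,
      Function.comp_def, Prod.mk.injEq]
    refine ⟨?_, trivial⟩
    rw [show (data.map (fun r => r.getD i0 none) ::
          t.map (fun i => data.map (fun r => r.getD i none)))
          = (i0 :: t).map (fun i => data.map (fun r => r.getD i none)) from rfl]
    rw [pvZipStar_eq ((i0 :: t).map (fun i => data.map (fun r => r.getD i none)))
      (by simp) (by
        intro r hr
        obtain ⟨i, _, rfl⟩ := List.mem_map.mp hr
        simp)]
    have hhead : (((i0 :: t).map (fun i => data.map (fun r => r.getD i none))).headD []).length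
        = data.length := by simp
    rw [hhead]
    rw [show (fun j => ((i0 :: t).map (fun i => data.map (fun r => r.getD i none))).map
          (fun r => r.getD j none))
        = (fun j => (i0 :: t).map (fun i => (data.getD j []).getD i none)) from ?_]
    · rw [map_range_getD data (fun row => (i0 :: t).map (fun i => row.getD i none))]
      simp only [List.map_cons]
    · funext j
      simp only [List.map_map, Function.comp_def]
      apply List.map_congr_left
      intro i _
      by_cases hj : j < data.length
      · rw [List.getD_eq_getElem _ _ (by simpa using hj),
          List.getD_eq_getElem data [] hj, List.getElem_map]
      · rw [List.getD_eq_default _ _ (by simpa using Nat.le_of_not_lt hj),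
          List.getD_eq_default data [] (Nat.le_of_not_lt hj)]
        simp

theorem cleanup_null_cols_spec : Claim_equal_cleanup_null_cols := by
  intro data columns _ hpre
  unfold Spec_cleanup_null_cols
  rw [A_eq data columns hpre.1, B_eq data columns hpre.1 hpre.2.1 hpre.2.2]
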